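-- pv_equiv track=rewrite | github.com/jloutey-hash/geovac | debug/gn_self_energy_gap.py | g_dirac_shell
-- ===== SOURCE A (Python) =====
-- def g_dirac_shell(n_fock: int) -> int:
--     """Degeneracy of one Fock shell in Dirac basis: 2*(l_range counts)."""
--     count = 0
--     for l in range(n_fock):
--         kappas = [-(l + 1)]
--         if l >= 1:
--             kappas.append(l)
--         for kappa in kappas:
--             abs_kappa = abs(kappa)
--             j2 = 2 * abs_kappa - 1  # 2j = 2|κ| - 1
--             count += j2 + 1  # 2j+1 states
--     return count
-- ===== SOURCE B (Python) =====
-- def g_dirac_shell(n_fock: int) -> int: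
--     """Degeneracy of one Fock shell in Dirac basis, in closed form: 2*n_fock**2."""
--     n = max(n_fock, 0)
--     return 2 * n * n
-- ===== Notes on version B (the rewrite author's own statement) =====
-- stated objective: faster
-- what changed: Replaced the double loop over shells and kappa values with the closed form 2*max(n_fock,0)**2.
import Mathlib
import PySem

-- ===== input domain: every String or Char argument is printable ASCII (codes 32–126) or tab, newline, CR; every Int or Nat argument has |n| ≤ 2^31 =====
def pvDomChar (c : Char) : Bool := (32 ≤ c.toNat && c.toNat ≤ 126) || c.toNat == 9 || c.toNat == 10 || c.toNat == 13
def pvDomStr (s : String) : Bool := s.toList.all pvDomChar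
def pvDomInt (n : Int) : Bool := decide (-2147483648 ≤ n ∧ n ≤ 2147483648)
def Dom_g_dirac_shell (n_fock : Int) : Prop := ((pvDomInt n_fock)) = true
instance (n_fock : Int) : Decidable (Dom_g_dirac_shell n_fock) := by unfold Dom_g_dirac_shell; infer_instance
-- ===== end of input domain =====

-- B replaces A's double loop by the closed form 2*max(n_fock,0)^2 (asymptotically faster).

-- ===== PORT A =====
-- literal port of A: for l in range(n_fock), build kappas, inner loop accumulates j2+1
def g_dirac_shell (n_fock : Int) : Int :=
  (PySem.List.pyRange 0 n_fock 1).foldl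
    (fun count l =>
      let kappas : List Int := [-(l + 1)] ++ (if l ≥ 1 then [l] else [])
      kappas.foldl
        (fun c kappa =>
          let abs_kappa := |kappa|
          let j2 := 2 * abs_kappa - 1
          c + (j2 + 1)) count)
    0

-- ===== PORT B =====
def g_dirac_shell_alt (n_fock : Int) : Int :=
  let n := max n_fock 0
  2 * n * n

-- ===== PRECONDITION & SPEC =====
def Spec_g_dirac_shell (n_fock : Int) (out : Int) : Prop := out = g_dirac_shell_alt n_fock
instance (n_fock : Int) (out : Int) : Decidable (Spec_g_dirac_shell n_fock out) := by unfold Spec_g_dirac_shell; infer_instance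

-- ===== CLAIM (what is proved, stated in full; the proofs are below) =====
def Claim_equal_g_dirac_shell : Prop := ∀ (n_fock : Int), Dom_g_dirac_shell n_fock → Spec_g_dirac_shell n_fock (g_dirac_shell n_fock)

-- ===== LEMMAS AND PROOFS =====

-- A's loop body adds exactly 4*l + 2 to the accumulator for any l ≥ 0
theorem pv_body_eq (count l : Int) (hl : 0 ≤ l) :
    ([-(l + 1)] ++ (if l ≥ 1 then [l] else [])).foldl
      (fun c kappa =>
        let abs_kappa := |kappa|
        let j2 := 2 * abs_kappa - 1
        c + (j2 + 1)) count = count + (4 * l + 2) := by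
  by_cases h : l ≥ 1
  · simp only [if_pos h, List.foldl_append, List.foldl_cons, List.foldl_nil]
    rw [abs_of_nonpos (by omega : -(l+1) ≤ 0), abs_of_nonneg (by omega : (0:Int) ≤ l)]
    ring
  · have : l = 0 := by omega
    subst this
    simp

-- the closed form of A's fold, by induction on the Nat length of the range
theorem pv_fold_range (m : Nat) :
    (PySem.List.pyRange 0 (m : Int) 1).foldl
      (fun count l =>
        let kappas : List Int := [-(l + 1)] ++ (if l ≥ 1 then [l] else [])
        kappas.foldl
          (fun c kappa =>
            let abs_kappa := |kappa|
            let j2 := 2 * abs_kappa - 1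
            c + (j2 + 1)) count)
      0 = 2 * (m : Int) * (m : Int) := by
  induction m with
  | zero => simp [PySem.List.pyRange_one_eq_nil]
  | succ k ih =>
    have h : ((k : Int) + 1 : Int) = ((k + 1 : Nat) : Int) := by push_cast; ring
    rw [← h, PySem.List.pyRange_one_succ_right (by positivity), List.foldl_append, ih]
    simp only [List.foldl]
    rw [pv_body_eq _ _ (by positivity)]
    ring

-- ===== VERDICT (by name: the statement is the Claim_ definition above) =====
theorem g_dirac_shell_spec : Claim_equal_g_dirac_shell := by
  intro n _
  unfold Spec_g_dirac_shell g_dirac_shell g_dirac_shell_alt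
  by_cases hn : 0 ≤ n
  · obtain ⟨m, rfl⟩ := Int.eq_ofNat_of_zero_le hn
    rw [pv_fold_range]
    simp [max_eq_left hn]
  · rw [PySem.List.pyRange_one_eq_nil (by omega)]
    simp [max_eq_right (by omega : n ≤ 0)]
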